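-- pv_equiv track=rewrite | github.com/alessio-ca/advent_of_code | 2022/15/main.py | create_vertex_array
-- ===== SOURCE A (Python) =====
-- def create_vertex_array(c, d):
--     xc, yc = c
--     # Create vertex array
--     offset = d + 0j
--     v = []
--     for _ in range(4):
--         dx = int(offset.real)
--         dy = int(offset.imag)
--         v.append((xc + dx, yc + dy))
--         offset *= 1j
--     return v
-- ===== SOURCE B (Python) =====
-- def create_vertex_array(c, d):
--     xc, yc = c
--     return [(xc + d, yc), (xc, yc + d), (xc - d, yc), (xc, yc - d)]
-- ===== Notes on version B (the rewrite author's own statement) =====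
-- stated objective: simpler
-- what changed: Replaces the 4-step complex-rotation loop (offset *= 1j with int truncation of real/imag parts) by the closed-form list of the four signed offsets.
import Mathlib
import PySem

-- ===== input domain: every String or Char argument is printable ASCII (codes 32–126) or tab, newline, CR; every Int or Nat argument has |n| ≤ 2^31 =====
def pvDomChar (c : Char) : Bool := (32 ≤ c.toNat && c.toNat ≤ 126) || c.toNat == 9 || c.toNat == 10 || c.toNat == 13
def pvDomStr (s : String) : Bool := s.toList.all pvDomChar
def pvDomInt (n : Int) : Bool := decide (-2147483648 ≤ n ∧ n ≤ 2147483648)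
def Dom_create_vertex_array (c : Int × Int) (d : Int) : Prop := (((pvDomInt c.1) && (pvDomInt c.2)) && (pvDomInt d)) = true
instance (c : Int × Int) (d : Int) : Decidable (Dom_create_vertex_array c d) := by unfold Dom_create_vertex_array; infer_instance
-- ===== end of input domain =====

-- ===== PORT A =====
-- Port of A: loop rotating the offset by i each step ((ox,oy) * i = (-oy, ox)),
-- appending (xc+ox, yc+oy). d is an Int, so int(offset.real)/int(offset.imag) are exact.
def create_vertex_array (c : Int × Int) (d : Int) : List (Int × Int) :=
  let xc := c.1
  let yc := c.2
  let res := (List.range 4).foldl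
    (fun (st : (Int × Int) × List (Int × Int)) _ =>
      let offset := st.1
      let dx := offset.1
      let dy := offset.2
      ((-offset.2, offset.1), st.2 ++ [(xc + dx, yc + dy)]))
    ((d, 0), [])
  res.2

-- ===== PORT B =====
-- Port of B: the four vertices written out directly.
def create_vertex_array_alt (c : Int × Int) (d : Int) : List (Int × Int) :=
  [(c.1 + d, c.2), (c.1, c.2 + d), (c.1 - d, c.2), (c.1, c.2 - d)]

-- ===== PRECONDITION & SPEC =====
def Spec_create_vertex_array (c : Int × Int) (d : Int) (out : List (Int × Int)) : Prop := out = create_vertex_array_alt c d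
instance (c : Int × Int) (d : Int) (out : List (Int × Int)) : Decidable (Spec_create_vertex_array c d out) := by unfold Spec_create_vertex_array; infer_instance

-- ===== CLAIM (what is proved, stated in full; the proofs are below) =====
def Claim_equal_create_vertex_array : Prop := ∀ (c : Int × Int) (d : Int), Dom_create_vertex_array c d → Spec_create_vertex_array c d (create_vertex_array c d)

-- ===== LEMMAS AND PROOFS =====

-- ===== VERDICT (by name: the statement is the Claim_ definition above) =====
theorem create_vertex_array_spec : Claim_equal_create_vertex_array := by
  intro c d _
  unfold Spec_create_vertex_array create_vertex_array create_vertex_array_alt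
  simp [List.range_succ]
  omega
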